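-- pv_equiv track=rewrite | github.com/Servoteh/Servosync | scripts/export_employees_kadrovska_report.py | fieldnames_for
-- ===== SOURCE A (Python) =====
-- def fieldnames_for(rows: list[dict]) -> list[str]:
--     all_keys: set[str] = set()
--     for r in rows:
--         all_keys.update(r.keys())
--     preferred = [
--         "id",
--         "full_name",
--         "first_name",
--         "last_name",
--         "department",
--         "position",
--         "phone",
--         "email",
--         "hire_date",
--         "is_active",
--         "note",
--         "personal_id",
--         "birth_date",
--         "gender",
--         "address",
--         "city",
--         "postal_code",
--         "bank_name",
--         "bank_account",
--         "phone_private",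
--         "emergency_contact_name",
--         "emergency_contact_phone",
--         "slava",
--         "slava_day",
--         "education_level",
--         "education_title",
--         "medical_exam_date",
--         "medical_exam_expires",
--         "team",
--         "created_at",
--         "updated_at",
--     ]
--     return [k for k in preferred if k in all_keys] + sorted(
--         k for k in all_keys if k not in preferred
--     )
-- ===== SOURCE B (Python) =====
-- def fieldnames_for(rows: list[dict]) -> list[str]:
--     preferred = [
--         "id",
--         "full_name",
--         "first_name",
--         "last_name",
--         "department",
--         "position",
--         "phone",
--         "email",
--         "hire_date",
--         "is_active",
--         "note",
--         "personal_id",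
--         "birth_date",
--         "gender",
--         "address",
--         "city",
--         "postal_code",
--         "bank_name",
--         "bank_account",
--         "phone_private",
--         "emergency_contact_name",
--         "emergency_contact_phone",
--         "slava",
--         "slava_day",
--         "education_level",
--         "education_title",
--         "medical_exam_date",
--         "medical_exam_expires",
--         "team",
--         "created_at",
--         "updated_at",
--     ]
--     rank = {k: i for i, k in enumerate(preferred)}
--     all_keys: set = set()
--     for r in rows:
--         all_keys.update(r.keys())
--     return sorted(all_keys, key=lambda k: (rank.get(k, len(preferred)), k))
-- ===== Notes on version B (the rewrite author's own statement) =====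
-- stated objective: idiomatic
-- what changed: Replaces A's two-phase build (filter preferred by membership, then separately sort the non-preferred remainder and concatenate) with a rank-index table and one keyed sort of the whole key union: sorted(all_keys, key=lambda k: (rank.get(k, len(preferred)), k)).
import Mathlib
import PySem

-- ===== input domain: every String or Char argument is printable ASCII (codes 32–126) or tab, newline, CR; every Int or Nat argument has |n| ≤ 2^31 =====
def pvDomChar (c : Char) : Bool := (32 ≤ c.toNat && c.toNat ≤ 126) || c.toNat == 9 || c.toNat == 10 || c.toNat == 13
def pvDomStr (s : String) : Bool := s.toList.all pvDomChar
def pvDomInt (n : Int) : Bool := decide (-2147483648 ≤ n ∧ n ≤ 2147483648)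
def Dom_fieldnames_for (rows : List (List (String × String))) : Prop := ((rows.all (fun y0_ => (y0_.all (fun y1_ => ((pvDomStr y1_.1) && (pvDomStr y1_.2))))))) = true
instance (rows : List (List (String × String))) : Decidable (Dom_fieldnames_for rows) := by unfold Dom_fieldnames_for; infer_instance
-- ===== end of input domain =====

-- B replaces A's two-phase build (preferred filter + separately sorted remainder, concatenated)
-- with a rank-index table and ONE keyed sort of the whole key union (objective: idiomatic).

-- the `preferred` literal both Pythons contain verbatim
def pvPreferred : List String :=
  ["id", "full_name", "first_name", "last_name", "department", "position", "phone",
   "email", "hire_date", "is_active", "note", "personal_id", "birth_date", "gender",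
   "address", "city", "postal_code", "bank_name", "bank_account", "phone_private",
   "emergency_contact_name", "emergency_contact_phone", "slava", "slava_day",
   "education_level", "education_title", "medical_exam_date", "medical_exam_expires",
   "team", "created_at", "updated_at"]

-- ===== PORT A =====
def fieldnames_for (rows : List (List (String × String))) : List String :=
  -- all_keys = set(); for r in rows: all_keys.update(r.keys())
  let all_keys : PySem.Set String :=
    rows.foldl (fun s r => PySem.Set.update s (PySem.Dict.ofList r).keys) PySem.Set.empty
  let preferred := pvPreferred
  -- [k for k in preferred if k in all_keys] + sorted(k for k in all_keys if k not in preferred)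
  (preferred.filter (fun k => PySem.Set.contains all_keys k))
    ++ PySem.List.sorted (all_keys.filter (fun k => !preferred.contains k)) (fun x => x) false

-- ===== PORT B =====
def fieldnames_for_alt (rows : List (List (String × String))) : List String :=
  let preferred := pvPreferred
  -- rank = {k: i for i, k in enumerate(preferred)}
  let rank : PySem.Dict String Int :=
    (PySem.List.enumerate preferred 0).foldl (fun d p => d.insert p.2 p.1) PySem.Dict.empty
  let all_keys : PySem.Set String :=
    rows.foldl (fun s r => PySem.Set.update s (PySem.Dict.ofList r).keys) PySem.Set.empty
  -- sorted(all_keys, key=lambda k: (rank.get(k, len(preferred)), k))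
  PySem.List.sorted2 all_keys
    (fun k => rank.getD k (PySem.List.len preferred)) (fun k => k) false

-- ===== PRECONDITION & SPEC =====
def Spec_fieldnames_for (rows : List (List (String × String))) (out : List String) : Prop := out = fieldnames_for_alt rows
instance (rows : List (List (String × String))) (out : List String) : Decidable (Spec_fieldnames_for rows out) := by unfold Spec_fieldnames_for; infer_instance

-- ===== CLAIM (what is proved, stated in full; the proofs are below) =====
def Claim_equal_fieldnames_for : Prop := ∀ (rows : List (List (String × String))), Dom_fieldnames_for rows → Spec_fieldnames_for rows (fieldnames_for rows)

-- ===== LEMMAS AND PROOFS =====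

-- B's rank dict, as a closed term (what the `let rank := …` in the port computes)
def pvRank : PySem.Dict String Int :=
  (PySem.List.enumerate pvPreferred 0).foldl (fun d p => d.insert p.2 p.1) PySem.Dict.empty

-- rank.get(k, 31) for k ∈ preferred is its position, hence < 31 and strictly increasing
set_option maxRecDepth 8192 in
theorem pvRank_lt : ∀ k ∈ pvPreferred, pvRank.getD k 31 < 31 := by decide

set_option maxRecDepth 8192 in
theorem pvRank_pairwise : pvPreferred.Pairwise (fun a b => pvRank.getD a 31 < pvRank.getD b 31) := by
  decide

theorem pvPreferred_nodup : pvPreferred.Nodup := by decide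

set_option maxRecDepth 8192 in
theorem pvRank_keys : pvRank.keys = pvPreferred := by decide

theorem pvRank_notin {k : String} (h : k ∉ pvPreferred) : pvRank.getD k 31 = 31 := by
  apply PySem.Dict.getD_of_not_contains
  rw [Bool.eq_false_iff]
  intro hc
  exact h (pvRank_keys ▸ (PySem.Dict.contains_iff_mem_keys pvRank k).mp hc)

-- sorted2 with keys (f, id) IS sorted with the lexicographic key
theorem sorted2_eq_sorted_lex (xs : List String) (f : String → Int) :
    PySem.List.sorted2 xs f (fun k => k) false
      = PySem.List.sorted xs (fun k => (toLex (f k, k) : Lex (Int × String))) false := by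
  rw [PySem.List.sorted_eq_foldl_insertBy]
  unfold PySem.List.sorted2
  simp only [if_neg (by decide : ¬ (false = true))]
  have hcmp : (fun (a b : String) => decide (f a < f b) || (!decide (f b < f a) && decide (a < b)))
      = fun a b => decide ((toLex (f a, a) : Lex (Int × String)) < toLex (f b, b)) := by
    funext a b
    rcases lt_trichotomy (f a) (f b) with h | h | h
    · simp [Prod.Lex.lt_iff, h]
    · simp [Prod.Lex.lt_iff, h]
    · simp [Prod.Lex.lt_iff, h, not_lt_of_gt]
  rw [hcmp]

-- the heart: one lex-keyed sort of a duplicate-free union equals A's two-phase build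
theorem union_sorted_eq (S : List String) (hnd : S.Nodup) :
    PySem.List.sorted S (fun k => (toLex (pvRank.getD k 31, k) : Lex (Int × String))) false
      = pvPreferred.filter (fun k => PySem.Set.contains S k)
        ++ PySem.List.sorted (S.filter (fun k => !pvPreferred.contains k)) (fun x => x) false := by
  apply PySem.List.sorted_eq_of_perm_of_pairwise_lt
  · -- permutation
    have hnd1 : (pvPreferred.filter (fun k => PySem.Set.contains S k)).Nodup :=
      pvPreferred_nodup.filter _
    have hperm2 := PySem.List.sorted_perm (S.filter (fun k => !pvPreferred.contains k)) (fun x => x) false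
    have hnd2 : (PySem.List.sorted (S.filter (fun k => !pvPreferred.contains k)) (fun x => x) false).Nodup :=
      hperm2.nodup_iff.mpr (hnd.filter _)
    rw [List.perm_ext_iff_of_nodup (hnd1.append hnd2 ?disj) hnd]
    case disj =>
      intro a ha1 ha2
      have h1 : a ∈ pvPreferred := List.mem_of_mem_filter ha1
      have h2 := hperm2.mem_iff.mp ha2
      simp only [List.mem_filter, Bool.not_eq_true', List.contains_eq_mem, decide_eq_false_iff_not] at h2
      exact h2.2 h1
    intro a
    rw [List.mem_append, hperm2.mem_iff]
    simp only [List.mem_filter, PySem.Set.contains, List.contains_eq_mem, decide_eq_true_eq,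
      Bool.not_eq_true', decide_eq_false_iff_not]
    constructor
    · rintro (⟨_, h⟩ | ⟨h, _⟩) <;> exact h
    · intro hS
      by_cases hp : a ∈ pvPreferred
      · exact Or.inl ⟨hp, hS⟩
      · exact Or.inr ⟨hS, hp⟩
  · -- strictly increasing under the lex key
    rw [List.pairwise_append]
    refine ⟨?_, ?_, ?_⟩
    · refine (pvRank_pairwise.filter _).imp ?_
      intro a b h
      exact Prod.Lex.lt_iff.mpr (Or.inl h)
    · have hle := PySem.List.sorted_pairwise (S.filter (fun k => !pvPreferred.contains k)) (fun x => x)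
      have hperm2 := PySem.List.sorted_perm (S.filter (fun k => !pvPreferred.contains k)) (fun x => x) false
      have hnd2 : (PySem.List.sorted (S.filter (fun k => !pvPreferred.contains k)) (fun x => x) false).Nodup :=
        hperm2.nodup_iff.mpr (hnd.filter _)
      refine List.Pairwise.imp_of_mem ?_ (hle.and hnd2)
      intro a b ha hb hab
      have hna : a ∉ pvPreferred := by
        have := hperm2.mem_iff.mp ha
        simp only [List.mem_filter, Bool.not_eq_true', List.contains_eq_mem,
          decide_eq_false_iff_not] at this
        exact this.2
      have hnb : b ∉ pvPreferred := by
        have := hperm2.mem_iff.mp hb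
        simp only [List.mem_filter, Bool.not_eq_true', List.contains_eq_mem,
          decide_eq_false_iff_not] at this
        exact this.2
      refine Prod.Lex.lt_iff.mpr (Or.inr ⟨?_, lt_of_le_of_ne hab.1 hab.2⟩)
      simp [pvRank_notin hna, pvRank_notin hnb]
    · intro a ha b hb
      have hpa : a ∈ pvPreferred := List.mem_of_mem_filter ha
      have hnb : b ∉ pvPreferred := by
        have := (PySem.List.sorted_perm (S.filter (fun k => !pvPreferred.contains k)) (fun x => x) false).mem_iff.mp hb
        simp only [List.mem_filter, Bool.not_eq_true', List.contains_eq_mem,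
          decide_eq_false_iff_not] at this
        exact this.2
      refine Prod.Lex.lt_iff.mpr (Or.inl ?_)
      rw [pvRank_notin hnb]
      exact pvRank_lt a hpa

-- the running union of row keys has no duplicates
theorem allkeys_nodup (rows : List (List (String × String))) :
    (rows.foldl (fun s r => PySem.Set.update s (PySem.Dict.ofList r).keys) PySem.Set.empty).Nodup := by
  suffices h : ∀ (s : PySem.Set String), s.Nodup →
      (rows.foldl (fun s r => PySem.Set.update s (PySem.Dict.ofList r).keys) s).Nodup from
    h _ List.nodup_nil
  induction rows with
  | nil => intro s hs; exact hs
  | cons r rs ih =>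
      intro s hs
      exact ih _ (PySem.Set.nodup_update _ _ hs)

-- ===== VERDICT (by name: the statement is the Claim_ definition above) =====
theorem fieldnames_for_spec : Claim_equal_fieldnames_for := by
  intro rows _
  show fieldnames_for rows = fieldnames_for_alt rows
  show (pvPreferred.filter (fun k => PySem.Set.contains
          (rows.foldl (fun s r => PySem.Set.update s (PySem.Dict.ofList r).keys) PySem.Set.empty) k))
      ++ PySem.List.sorted
          ((rows.foldl (fun s r => PySem.Set.update s (PySem.Dict.ofList r).keys)
              PySem.Set.empty).filter (fun k => !pvPreferred.contains k)) (fun x => x) false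
    = PySem.List.sorted2
        (rows.foldl (fun s r => PySem.Set.update s (PySem.Dict.ofList r).keys) PySem.Set.empty)
        (fun k => pvRank.getD k 31) (fun k => k) false
  rw [sorted2_eq_sorted_lex]
  exact (union_sorted_eq _ (allkeys_nodup rows)).symm
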